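-- pv_equiv track=rewrite | github.com/maomao905/algo | largest-subarray-length-k.py | largestSubarray
-- ===== SOURCE A (Python) =====
-- from typing import List
--
-- def largestSubarray(nums: List[int], k: int) -> List[int]:
--     N=len(nums)
--     j = 0
--     d = 0
--     for i in range(1,N):
--         if nums[j+d] == nums[i] and d < k-1:
--             d += 1
--             continue
--
--         if nums[j+d] < nums[i] and i-d+k-1<N:
--             j = i-d
--
--         d = 0
--
--     return nums[j:j+k]
-- ===== SOURCE B (Python) =====
-- def largestSubarray(nums, k):
--     N = len(nums)
--     if k > N:
--         return nums[:k]
--     # A window may start anywhere in nums[:N-k+1]; with pairwise-distinct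
--     # elements (the problem's constraint) the lexicographically largest window
--     # begins at the maximum of that prefix, and .index finds that start.
--     start = nums.index(max(nums[:N - k + 1])) if nums else 0
--     return nums[start:start + k]
-- ===== Notes on version B (the rewrite author's own statement) =====
-- stated objective: simpler
-- what changed: Replaces A's tandem greedy scan with its (j,d) match-counter state machine by the direct idiomatic solution for the problem's pairwise-distinct domain: slice the window at nums.index(max(nums[:N-k+1])); Pre_ states the distinctness the problem (LeetCode 1708) guarantees, outside which A's greedy is not the lexicographic maximum.
-- outside the precondition, e.g. on largestSubarray([0, 2, 2, 3, 3, 1, 1, 0], 2): A returns [3, 1], B returns [3, 3]; on largestSubarray([2, 2], 1): A returns [2], B returns [2]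
import Mathlib
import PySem

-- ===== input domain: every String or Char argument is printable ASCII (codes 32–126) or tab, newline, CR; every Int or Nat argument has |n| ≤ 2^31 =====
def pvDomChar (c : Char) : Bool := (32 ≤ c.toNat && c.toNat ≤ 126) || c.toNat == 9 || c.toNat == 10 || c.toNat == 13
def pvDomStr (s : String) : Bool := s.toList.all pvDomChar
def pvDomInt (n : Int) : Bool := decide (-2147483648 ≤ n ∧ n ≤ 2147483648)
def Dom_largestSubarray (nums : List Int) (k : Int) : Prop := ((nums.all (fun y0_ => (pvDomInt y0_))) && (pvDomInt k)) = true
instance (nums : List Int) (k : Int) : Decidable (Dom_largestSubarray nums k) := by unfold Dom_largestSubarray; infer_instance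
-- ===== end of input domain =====

-- B replaces A's tandem greedy scan (match counter d, shifting start j) by the direct
-- idiomatic solution for pairwise-distinct nums (the problem's stated constraint, Pre_):
-- slice the window at the index of the maximum over the valid window starts.

-- ===== PORT A =====
-- Every index A reads (j+d and i) lies in [0, N), so pyGetD _ _ 0 is exact here.
def pvStepA (nums : List Int) (k N : Int) (s : Int × Int) (i : Int) : Int × Int :=
  if PySem.List.pyGetD nums (s.1 + s.2) 0 = PySem.List.pyGetD nums i 0 ∧ s.2 < k - 1 then
    (s.1, s.2 + 1)
  else if PySem.List.pyGetD nums (s.1 + s.2) 0 < PySem.List.pyGetD nums i 0 ∧ i - s.2 + k - 1 < N then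
    (i - s.2, 0)
  else (s.1, 0)

def largestSubarray (nums : List Int) (k : Int) : List Int :=
  let N : Int := nums.length
  let s := (PySem.List.pyRange 1 N 1).foldl (pvStepA nums k N) (0, 0)
  PySem.List.slice nums (some s.1) (some (s.1 + k))

-- ===== PORT B =====
-- start = nums.index(max(nums[:N-k+1])) if nums else 0 ; the .getD defaults are
-- unreachable (the prefix is nonempty when nums ≠ [] and k ≤ N, and max is a member).
def largestSubarray_alt (nums : List Int) (k : Int) : List Int :=
  let N : Int := nums.length
  if k > N then PySem.List.slice nums none (some k)
  else
    let start : Int :=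
      if nums = [] then 0
      else
        let m := (PySem.List.max? (PySem.List.slice nums none (some (N - k + 1))) (fun x => x)).getD 0
        (((PySem.List.index? nums m).getD 0 : Nat) : Int)
    PySem.List.slice nums (some start) (some (start + k))

-- ===== PRECONDITION & SPEC =====
-- Pre_ excludes lists with duplicate elements: the problem (LeetCode 1708) guarantees
-- pairwise-distinct nums, and A's greedy scan is wrong outside that natural domain.
def Pre_largestSubarray (nums : List Int) (k : Int) : Prop := nums.Nodup
instance (nums : List Int) (k : Int) : Decidable (Pre_largestSubarray nums k) := by unfold Pre_largestSubarray; infer_instance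
def pvWitness_largestSubarray : List Int × Int := ([3, 1, 4, 2], 2)

def Spec_largestSubarray (nums : List Int) (k : Int) (out : List Int) : Prop := out = largestSubarray_alt nums k
instance (nums : List Int) (k : Int) (out : List Int) : Decidable (Spec_largestSubarray nums k out) := by unfold Spec_largestSubarray; infer_instance

-- ===== CLAIM (what is proved, stated in full; the proofs are below) =====
def Claim_equal_largestSubarray : Prop := ∀ (nums : List Int) (k : Int), Dom_largestSubarray nums k → Pre_largestSubarray nums k → Spec_largestSubarray nums k (largestSubarray nums k)

-- ===== LEMMAS AND PROOFS =====

-- the simple loop A's greedy collapses to once the match branch is dead (distinct elements)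
def gStep (nums : List Int) (k N : Int) (j i : Int) : Int :=
  if PySem.List.pyGetD nums j 0 < PySem.List.pyGetD nums i 0 ∧ i + k - 1 < N then i else j

theorem pyGetD_ne_of_nodup (nums : List Int) (h : nums.Nodup) {a b : Int}
    (ha : 0 ≤ a) (hb : 0 ≤ b) (ha' : a < nums.length) (hb' : b < nums.length) (hab : a ≠ b) :
    PySem.List.pyGetD nums a 0 ≠ PySem.List.pyGetD nums b 0 := by
  rw [PySem.List.pyGetD_eq_getElem nums 0 ha ha', PySem.List.pyGetD_eq_getElem nums 0 hb hb']
  intro he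
  have := (h.getElem_inj_iff (hi := by omega) (hj := by omega)).mp he
  omega

-- under Nodup, A's match branch never fires: the fold of pvStepA from (j,0) tracks gStep
theorem foldA_eq (nums : List Int) (k : Int) (h : nums.Nodup) :
    ∀ (n : Nat) (i j : Int), i = (nums.length : Int) - n → 1 ≤ i → 0 ≤ j → j < i →
      ((PySem.List.pyRange i nums.length 1).foldl (pvStepA nums k nums.length) (j, 0)).1
        = (PySem.List.pyRange i nums.length 1).foldl (gStep nums k nums.length) j := by
  intro n
  induction n with
  | zero =>
    intro i j hi h1 h0 hji
    rw [PySem.List.pyRange_one_eq_nil (by omega)]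
    rfl
  | succ m ih =>
    intro i j hi h1 h0 hji
    by_cases hiN : i < (nums.length : Int)
    · rw [PySem.List.pyRange_one_cons hiN]
      simp only [List.foldl_cons]
      have hne : PySem.List.pyGetD nums (j + 0) 0 ≠ PySem.List.pyGetD nums i 0 := by
        rw [show j + (0:Int) = j by ring]
        exact pyGetD_ne_of_nodup nums h h0 (by omega) (by omega) hiN (by omega)
      have hstep : pvStepA nums k nums.length (j, 0) i = (gStep nums k nums.length j i, 0) := by
        unfold pvStepA gStep
        rw [if_neg (fun hx => hne hx.1)]
        simp only [show j + (0:Int) = j by ring, show i - (0:Int) = i by ring]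
        split_ifs <;> rfl
      rw [hstep]
      by_cases hc : PySem.List.pyGetD nums j 0 < PySem.List.pyGetD nums i 0 ∧ i + k - 1 < (nums.length : Int)
      · have : gStep nums k nums.length j i = i := by unfold gStep; rw [if_pos hc]
        rw [this]
        exact ih (i + 1) i (by omega) (by omega) (by omega) (by omega)
      · have : gStep nums k nums.length j i = j := by unfold gStep; rw [if_neg hc]
        rw [this]
        exact ih (i + 1) j (by omega) (by omega) (by omega) (by omega)
    · rw [PySem.List.pyRange_one_eq_nil (by omega)]
      rfl

-- if no index of the range is a valid window start, the gStep fold keeps j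
theorem gfold_const (nums : List Int) (k N : Int) :
    ∀ (l : List Int) (j : Int), (∀ i ∈ l, ¬ i + k - 1 < N) → l.foldl (gStep nums k N) j = j := by
  intro l
  induction l with
  | nil => intro j _; rfl
  | cons x t iht =>
    intro j hl
    simp only [List.foldl_cons]
    have : gStep nums k N j x = j := by
      unfold gStep
      rw [if_neg (fun hx => hl x (List.mem_cons_self) hx.2)]
    rw [this]
    exact iht j (fun i hi => hl i (List.mem_cons_of_mem x hi))

-- invariant of the gStep fold: the result is the unique strict maximum position
-- among window starts seen so far (positions < N-k+1)
theorem gfold_inv (nums : List Int) (k : Int) (h : nums.Nodup) :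
    ∀ (n : Nat) (i j : Int), i = (nums.length : Int) - n → 1 ≤ i → 0 ≤ j → j < i →
      (j < (nums.length : Int) - k + 1 ∨ j = 0) →
      (∀ t : Int, 0 ≤ t → t < i → t < (nums.length : Int) - k + 1 → t ≠ j →
        PySem.List.pyGetD nums t 0 < PySem.List.pyGetD nums j 0) →
      ∀ r : Int, r = (PySem.List.pyRange i nums.length 1).foldl (gStep nums k nums.length) j →
       0 ≤ r ∧ r < (nums.length : Int) ∧ (r < (nums.length : Int) - k + 1 ∨ r = 0) ∧
       (∀ t : Int, 0 ≤ t → t < (nums.length : Int) → t < (nums.length : Int) - k + 1 → t ≠ r →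
         PySem.List.pyGetD nums t 0 < PySem.List.pyGetD nums r 0) := by
  intro n
  induction n with
  | zero =>
    intro i j hi h1 h0 hji hjM hinv r hr
    rw [PySem.List.pyRange_one_eq_nil (by omega), List.foldl_nil] at hr
    subst hr
    exact ⟨h0, by omega, hjM, fun t ht1 ht2 ht3 ht4 => hinv t ht1 (by omega) ht3 ht4⟩
  | succ m ih =>
    intro i j hi h1 h0 hji hjM hinv r hr
    by_cases hiN : i < (nums.length : Int)
    · rw [PySem.List.pyRange_one_cons hiN] at hr
      simp only [List.foldl_cons] at hr
      by_cases hc : PySem.List.pyGetD nums j 0 < PySem.List.pyGetD nums i 0 ∧ i + k - 1 < (nums.length : Int)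
      · have hg : gStep nums k nums.length j i = i := by unfold gStep; rw [if_pos hc]
        rw [hg] at hr
        refine ih (i + 1) i (by omega) (by omega) (by omega) (by omega) (Or.inl (by omega)) ?_ r hr
        intro t ht1 ht2 ht3 ht4
        by_cases htj : t = j
        · rw [htj]; exact hc.1
        · exact lt_trans (hinv t ht1 (by omega) ht3 htj) hc.1
      · have hg : gStep nums k nums.length j i = j := by unfold gStep; rw [if_neg hc]
        rw [hg] at hr
        refine ih (i + 1) j (by omega) (by omega) (by omega) (by omega) hjM ?_ r hr
        intro t ht1 ht2 ht3 ht4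
        by_cases hti : t = i
        · subst hti
          have hne : PySem.List.pyGetD nums j 0 ≠ PySem.List.pyGetD nums t 0 :=
            pyGetD_ne_of_nodup nums h h0 ht1 (by omega) (by omega) (by omega)
          have : ¬ PySem.List.pyGetD nums j 0 < PySem.List.pyGetD nums t 0 :=
            fun hlt => hc ⟨hlt, by omega⟩
          omega
        · exact hinv t ht1 (by omega) ht3 ht4
    · exact absurd (by omega : i < (nums.length : Int)) hiN

-- first occurrence: the index of a value strictly larger than everything before it
theorem index?_eq_of_strict_max (nums : List Int) (r : Nat) (hr : r < nums.length)
    (hmax : ∀ p : Nat, (hp : p < r) → nums[p]'(by omega) ≠ nums[r]) :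
    PySem.List.index? nums (nums[r]) = some r := by
  rw [PySem.List.index?_eq_some_iff]
  refine ⟨nums.take r, nums.drop (r + 1), ?_, by rw [List.length_take]; omega, ?_⟩
  · conv_lhs => rw [← List.take_append_drop r nums]
    rw [List.drop_eq_getElem_cons hr]
  · intro hmem
    obtain ⟨p, hp, hpe⟩ := List.mem_iff_getElem.mp hmem
    have hpr : p < r := by
      have := hp; rw [List.length_take] at this; omega
    rw [List.getElem_take] at hpe
    exact hmax p hpr hpe

-- ===== VERDICT (by name: the statement is the Claim_ definition above) =====
theorem largestSubarray_spec : Claim_equal_largestSubarray := by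
  intro nums k _ hpre
  unfold Spec_largestSubarray
  unfold Pre_largestSubarray at hpre
  simp only [largestSubarray, largestSubarray_alt]
  by_cases hk : k > (nums.length : Int)
  · -- guard branch: no i ≥ 1 is a valid start, so A keeps j = 0 and returns nums[:k]
    rw [if_pos hk]
    have hfold : ((PySem.List.pyRange 1 nums.length 1).foldl (pvStepA nums k nums.length) (0, 0)).1 = 0 := by
      by_cases hN : 1 ≤ (nums.length : Int)
      · rw [foldA_eq nums k hpre (nums.length - 1) 1 0 (by omega) (by omega) (by omega) (by omega)]
        exact gfold_const nums k nums.length _ 0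
          (fun i hi => by
            have := (PySem.List.mem_pyRange_one).mp hi
            omega)
      · rw [PySem.List.pyRange_one_eq_nil (by omega)]
        rfl
    rw [hfold, show (0:Int) + k = k by ring, PySem.List.slice_zero_start]
  · rw [if_neg hk]
    by_cases hnil : nums = []
    · subst hnil
      rw [if_pos rfl]
      simp only [List.length_nil, Nat.cast_zero]
      rw [PySem.List.pyRange_one_eq_nil (by omega), List.foldl_nil]
    · rw [if_neg hnil]
      have hN : 1 ≤ (nums.length : Int) := by
        have h0 : 0 < nums.length := List.length_pos_of_ne_nil hnil
        omega
      -- A's start: the gStep fold result r, with its invariant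
      have hA := foldA_eq nums k hpre (nums.length - 1) 1 0 (by omega) (by omega) (by omega) (by omega)
      set r := (PySem.List.pyRange 1 nums.length 1).foldl (gStep nums k nums.length) 0 with hrdef
      obtain ⟨hr0, hrN, hrM, hrmax⟩ :=
        gfold_inv nums k hpre (nums.length - 1) 1 0 (by omega) (by omega) (by omega) (by omega)
          (Or.inr rfl) (fun t ht1 ht2 _ ht4 => by omega) r hrdef
      have hrM' : r < (nums.length : Int) - k + 1 := by
        rcases hrM with h | h
        · exact h
        · omega
      -- the prefix of valid starts
      have hM0 : (0:Int) ≤ (nums.length : Int) - k + 1 := by omega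
      rw [PySem.List.slice_to nums hM0]
      have hPlen : (nums.take ((nums.length : Int) - k + 1).toNat).length
          = min ((nums.length : Int) - k + 1).toNat nums.length := List.length_take
      have hPne : nums.take ((nums.length : Int) - k + 1).toNat ≠ [] := by
        intro hP
        have := congrArg List.length hP
        rw [hPlen] at this
        simp only [List.length_nil] at this
        omega
      -- max? of the prefix is some nums[r.toNat]
      obtain ⟨mv, hmv⟩ : ∃ mv,
          PySem.List.max? (nums.take ((nums.length : Int) - k + 1).toNat) (fun x => x) = some mv := by
        cases hmx : PySem.List.max? (nums.take ((nums.length : Int) - k + 1).toNat) (fun x => x) with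
        | none => exact absurd ((PySem.List.max?_eq_none_iff _ _).mp hmx) hPne
        | some mv => exact ⟨mv, rfl⟩
      have hrnat : r.toNat < nums.length := by omega
      have hrP : r.toNat < (nums.take ((nums.length : Int) - k + 1).toNat).length := by
        rw [hPlen]; omega
      have hgr : PySem.List.pyGetD nums r 0 = nums[r.toNat] :=
        PySem.List.pyGetD_eq_getElem nums 0 hr0 hrN
      have hmveq : mv = nums[r.toNat] := by
        have hmem := PySem.List.max?_mem hmv
        obtain ⟨p, hp, hpe⟩ := List.mem_iff_getElem.mp hmem
        have hpn : p < nums.length := by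
          have := hp; rw [hPlen] at this; omega
        have hpM : p < ((nums.length : Int) - k + 1).toNat := by
          have := hp; rw [hPlen] at this; omega
        have hpe' : nums[p] = mv := by rw [← hpe]; exact List.getElem_take.symm
        by_cases hpr : p = r.toNat
        · subst hpr; exact hpe'.symm
        · -- p is another valid start, so nums[p] < nums[r]
          have hlt : PySem.List.pyGetD nums (p : Int) 0 < PySem.List.pyGetD nums r 0 :=
            hrmax p (by omega) (by omega) (by omega) (by omega)
          have hle : nums[r.toNat] ≤ mv := by
            have := PySem.List.max?_isMax hmv (nums[r.toNat])
              (List.mem_iff_getElem.mpr ⟨r.toNat, hrP, List.getElem_take⟩)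
            simpa using this
          rw [PySem.List.pyGetD_eq_getElem nums 0 (by omega) (by omega), hgr] at hlt
          simp only [Int.toNat_natCast] at hlt
          omega
      -- index? nums mv = some r.toNat
      have hidx : PySem.List.index? nums mv = some r.toNat := by
        rw [hmveq]
        refine index?_eq_of_strict_max nums r.toNat hrnat ?_
        intro p hp hpe
        have hlt : PySem.List.pyGetD nums (p : Int) 0 < PySem.List.pyGetD nums r 0 :=
          hrmax p (by omega) (by omega) (by omega) (by omega)
        rw [PySem.List.pyGetD_eq_getElem nums 0 (by omega) (by omega), hgr] at hlt
        simp only [Int.toNat_natCast] at hlt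
        omega
      rw [hA, hmv, Option.getD_some, hidx, Option.getD_some]
      rw [show ((r.toNat : Nat) : Int) = r by omega]
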